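-- pv_equiv track=rewrite | github.com/Yash-G/modelearth-codechat | src/core/smart_chunker.py | _find_markdown_break_point
-- ===== SOURCE A (Python) =====
-- from typing import Optional, List, Dict, Any, Tuple
--
-- def _find_markdown_break_point(lines: List[str]) -> int:
--     """Find optimal break point in markdown content"""
--     for i in range(len(lines) - 1, 0, -1):
--         line = lines[i].strip()
--         # Prefer breaking at paragraph breaks, list items, etc.
--         if not line:  # Empty line (paragraph break)
--             return i
--         if line.startswith(('- ', '* ', '1. ', '2. ', '3. ')):  # List items
--             return i
--     return len(lines) // 2  # Fallback to middle
-- ===== SOURCE B (Python) =====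
-- def _find_markdown_break_point(lines):
--     """Find optimal break point in markdown content"""
--     best = None
--     for i in range(1, len(lines)):
--         line = lines[i].strip()
--         if not line or line.startswith(('- ', '* ', '1. ', '2. ', '3. ')):
--             best = i
--     return best if best is not None else len(lines) // 2
-- ===== Notes on version B (the rewrite author's own statement) =====
-- stated objective: alternative
-- what changed: Replaces the reverse early-exit scan with a single forward pass that remembers the last qualifying index in an accumulator and falls back to len//2 when none was recorded.
import Mathlib
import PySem

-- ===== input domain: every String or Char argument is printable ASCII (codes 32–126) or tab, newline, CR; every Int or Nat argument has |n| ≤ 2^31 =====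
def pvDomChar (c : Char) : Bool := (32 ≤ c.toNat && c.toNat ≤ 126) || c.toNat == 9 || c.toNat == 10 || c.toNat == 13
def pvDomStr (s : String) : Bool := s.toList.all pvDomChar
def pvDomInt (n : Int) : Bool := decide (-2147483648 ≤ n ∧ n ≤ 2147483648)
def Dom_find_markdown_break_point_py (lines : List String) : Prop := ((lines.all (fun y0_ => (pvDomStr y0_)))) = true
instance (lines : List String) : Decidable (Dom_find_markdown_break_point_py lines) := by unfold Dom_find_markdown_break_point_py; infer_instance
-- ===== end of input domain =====

-- B replaces A's reverse early-exit scan by a forward pass keeping the last qualifying index (alternative decomposition, same cost).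
-- ===== PORT A =====
-- shared transliteration of the line test: lines[i].strip() empty or startswith(('- ','* ','1. ','2. ','3. '))
def pvIsBreakLine (lines : List String) (i : Int) : Bool :=
  let line := PySem.Str.strip (PySem.List.pyGetD lines i "")
  line == "" || PySem.Str.startswith line "- " || PySem.Str.startswith line "* " ||
    PySem.Str.startswith line "1. " || PySem.Str.startswith line "2. " || PySem.Str.startswith line "3. "

-- the loop 'for i in range(len(lines)-1, 0, -1)' with its early returns, as countdown recursion
def pvGoA (lines : List String) : Nat → Int
  | 0 => PySem.Int.floordiv (lines.length : Int) 2
  | i+1 => if pvIsBreakLine lines ((i : Int)+1) then ((i : Int)+1) else pvGoA lines i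

def find_markdown_break_point_py (lines : List String) : Int :=
  pvGoA lines (lines.length - 1)

-- ===== PORT B =====
def find_markdown_break_point_py_alt (lines : List String) : Int :=
  let best := (PySem.List.pyRange 1 (lines.length : Int) 1).foldl
      (fun acc i => if pvIsBreakLine lines i then some i else acc) (none : Option Int)
  match best with
  | some i => i
  | none => PySem.Int.floordiv (lines.length : Int) 2

-- ===== PRECONDITION & SPEC =====
def Spec_find_markdown_break_point_py (lines : List String) (out : Int) : Prop := out = find_markdown_break_point_py_alt lines
instance (lines : List String) (out : Int) : Decidable (Spec_find_markdown_break_point_py lines out) := by unfold Spec_find_markdown_break_point_py; infer_instance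

-- ===== CLAIM (what is proved, stated in full; the proofs are below) =====
def Claim_equal_find_markdown_break_point_py : Prop := ∀ (lines : List String), Dom_find_markdown_break_point_py lines → Spec_find_markdown_break_point_py lines (find_markdown_break_point_py lines)

-- ===== LEMMAS AND PROOFS =====

-- countdown early-exit scan over 1..n equals forward last-match fold over range 1..n
theorem pvGoA_eq_fold (lines : List String) (n : Nat) :
    pvGoA lines n =
      (match (PySem.List.pyRange 1 ((n : Int)+1) 1).foldl
          (fun acc i => if pvIsBreakLine lines i then some i else acc) (none : Option Int) with
        | some i => i
        | none => PySem.Int.floordiv (lines.length : Int) 2) := by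
  induction n with
  | zero =>
    rw [PySem.List.pyRange_one_eq_nil (by norm_num)]
    simp [pvGoA]
  | succ m ih =>
    rw [show ((m+1 : Nat) : Int) + 1 = (((m : Int)+1) + 1) by push_cast; ring,
        PySem.List.pyRange_one_succ_right (by omega), List.foldl_append]
    simp only [List.foldl]
    by_cases h : pvIsBreakLine lines ((m : Int)+1)
    · simp [pvGoA, h]
    · simp only [pvGoA, h, Bool.false_eq_true, if_false]
      exact ih

-- ===== VERDICT (by name: the statement is the Claim_ definition above) =====
theorem find_markdown_break_point_py_spec : Claim_equal_find_markdown_break_point_py := by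
  intro lines _
  unfold Spec_find_markdown_break_point_py find_markdown_break_point_py find_markdown_break_point_py_alt
  cases hl : lines.length with
  | zero =>
    rw [PySem.List.pyRange_one_eq_nil (by norm_num)]
    simp [pvGoA, hl]
  | succ m =>
    have h := pvGoA_eq_fold lines m
    rw [hl] at h
    simp only [Nat.add_sub_cancel]
    rw [show ((m+1 : Nat) : Int) = (m : Int) + 1 by push_cast; ring]
    exact h
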